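-- pv_equiv track=rewrite | github.com/l4m4re/Archive-Agent | archive_agent/util/text.py | sanitize_sentences
-- ===== SOURCE A (Python) =====
-- from typing import Set, List, Callable, Optional
--
-- def sanitize_sentences(sentences: List[str]) -> List[str]:
--     """
--     Sanitize sentences (strip whitespace, split on newlines, ignore empty lines).
--     :param sentences: Sentences.
--     :return: Sanitized sentences.
--     """
--     result = []
--     for sentence in sentences:
--         for part in sentence.splitlines():
--             s = part.strip()
--             if s:
--                 result.append(s)
--     return result
-- ===== SOURCE B (Python) =====
-- from typing import List
--
-- # Characters on which str.splitlines breaks lines.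
-- LINE_BREAKS = frozenset('\n\r\v\f\x1c\x1d\x1e\x85\u2028\u2029')
--
-- def sanitize_sentences(sentences: List[str]) -> List[str]:
--     """
--     Sanitize sentences (strip whitespace, split on newlines, ignore empty lines).
--     Single character-level scan with an explicit state machine: `word` holds the
--     stripped content of the current line, `pending` buffers whitespace that is
--     kept only if more non-whitespace follows; a line break flushes `word`.
--     """
--     result = []
--     for sentence in sentences:
--         word = []      # stripped content of the current line so far
--         pending = []   # whitespace seen after `word`, kept only if content follows
--         i, n = 0, len(sentence)
--         while i < n:
--             c = sentence[i]
--             if c in LINE_BREAKS: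
--                 if word:
--                     result.append(''.join(word))
--                 word = []
--                 pending = []
--                 if c == '\r' and i + 1 < n and sentence[i + 1] == '\n':
--                     i += 1
--             elif c.isspace():
--                 if word:
--                     pending.append(c)
--             else:
--                 word.extend(pending)
--                 pending = []
--                 word.append(c)
--             i += 1
--         if word:
--             result.append(''.join(word))
--     return result
-- ===== Notes on version B (the rewrite author's own statement) =====
-- stated objective: alternative
-- what changed: Replaces A's per-sentence splitlines + per-line strip/filter with a single character-level scan: an explicit state machine keeps the stripped content of the current line (word) and pending interior whitespace, flushing word on line-break characters (with \r\n lookahead), so splitlines and strip are never called.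
import Mathlib
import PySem

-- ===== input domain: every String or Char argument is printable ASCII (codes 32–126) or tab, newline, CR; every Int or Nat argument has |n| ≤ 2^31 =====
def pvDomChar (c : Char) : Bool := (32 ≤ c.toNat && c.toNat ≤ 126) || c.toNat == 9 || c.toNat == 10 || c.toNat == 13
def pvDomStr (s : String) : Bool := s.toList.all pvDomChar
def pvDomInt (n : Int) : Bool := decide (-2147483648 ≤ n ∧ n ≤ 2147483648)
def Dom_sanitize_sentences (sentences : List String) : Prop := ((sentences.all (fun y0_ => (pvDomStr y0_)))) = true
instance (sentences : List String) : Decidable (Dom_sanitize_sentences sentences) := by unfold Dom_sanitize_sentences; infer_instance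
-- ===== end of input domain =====

-- B replaces A's splitlines+strip per sentence by a single character-level scan with an explicit
-- state machine (word/pending buffers, flush on line-break chars); same return value (objective: alternative).


-- ===== PORT A =====
def sanitize_sentences (sentences : List String) : List String :=
  sentences.foldl
    (fun result sentence =>
      (PySem.Str.splitlines sentence).foldl
        (fun result part =>
          let s := PySem.Str.strip part
          if s ≠ "" then result ++ [s] else result)
        result)
    []

-- ===== PORT B =====
-- the characters on which str.splitlines breaks lines (Source B's LINE_BREAKS)
def pvIsBreak (c : Char) : Bool :=
  ['\n', '\r', '\x0b', '\x0c', '\x1c', '\x1d', '\x1e', '\x85', '\u2028', '\u2029'].contains c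

-- Source B's while loop over one sentence: word = stripped content of the current line,
-- pending = whitespace after word (kept only if content follows); '\r\n' consumes two chars
def pvScan : List Char → List Char → List Char → List String → List String
  | [], word, _pending, result =>
      if word ≠ [] then result ++ [String.ofList word] else result
  | '\r' :: '\n' :: rest, word, _pending, result =>
      pvScan rest [] [] (if word ≠ [] then result ++ [String.ofList word] else result)
  | c :: rest, word, pending, result =>
      if pvIsBreak c then
        pvScan rest [] [] (if word ≠ [] then result ++ [String.ofList word] else result)
      else if PySem.Chars.isspace c then
        pvScan rest word (if word ≠ [] then pending ++ [c] else pending) result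
      else
        pvScan rest (word ++ pending ++ [c]) [] result

def sanitize_sentences_alt (sentences : List String) : List String :=
  sentences.foldl (fun result sentence => pvScan sentence.toList [] [] result) []

-- ===== PRECONDITION & SPEC =====
def Spec_sanitize_sentences (sentences : List String) (out : List String) : Prop := out = sanitize_sentences_alt sentences
instance (sentences : List String) (out : List String) : Decidable (Spec_sanitize_sentences sentences out) := by unfold Spec_sanitize_sentences; infer_instance

-- ===== CLAIM (what is proved, stated in full; the proofs are below) =====
def Claim_equal_sanitize_sentences : Prop := ∀ (sentences : List String), Dom_sanitize_sentences sentences → Spec_sanitize_sentences sentences (sanitize_sentences sentences)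

-- ===== LEMMAS AND PROOFS =====

-- the break predicate str.splitlines uses (copy of the lambda inside PySem.Chars.splitlines)
def pvIsB (c : Char) : Bool :=
  have n := c.toNat
  decide (n = 10) || decide (n = 13) || decide (n = 11) || decide (n = 12) || decide (n = 28) || decide (n = 29) ||
    decide (n = 30) || decide (n = 133) || decide (n = 8232) || decide (n = 8233)

theorem pv_splitlines_go (cs : List Char) :
    PySem.Chars.splitlines cs = PySem.Chars.splitlines.go pvIsB cs [] [] := rfl

theorem pv_char_eq_iff (c d : Char) : (c = d) ↔ (c.toNat = d.toNat) := by
  constructor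
  · rintro rfl; rfl
  · intro h; rw [← Char.ofNat_toNat c, h, Char.ofNat_toNat]

theorem pvBreak_eq (c : Char) : pvIsBreak c = pvIsB c := by
  simp only [pvIsBreak, pvIsB, List.contains, List.elem_eq_mem, List.mem_cons, List.not_mem_nil, or_false,
    pv_char_eq_iff,
    show ('\n'.toNat) = 10 from rfl, show ('\x0d'.toNat) = 13 from rfl,
    show ('\x0b'.toNat) = 11 from rfl, show ('\x0c'.toNat) = 12 from rfl,
    show ('\x1c'.toNat) = 28 from rfl, show ('\x1d'.toNat) = 29 from rfl,
    show ('\x1e'.toNat) = 30 from rfl, show ('\x85'.toNat) = 133 from rfl,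
    show ('\u2028'.toNat) = 8232 from rfl, show ('\u2029'.toNat) = 8233 from rfl,
    Bool.or_assoc, Bool.decide_or]

-- strip-and-filter applied to a list of raw lines (char level)
def pvCleanGo (l : List (List Char)) : List (List Char) :=
  (l.map PySem.Chars.strip).filter (fun t => t ≠ [])

-- strip-and-filter of the lines of one char string
def pvCleanC (cs : List Char) : List (List Char) :=
  pvCleanGo (PySem.Chars.splitlines cs)

-- strip-and-filter of the lines of one String
def pvCleanS (s : String) : List String :=
  ((PySem.Str.splitlines s).map (fun line => PySem.Str.strip line)).filter (fun t => t ≠ "")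

-- equation lemmas for splitlines.go, one per branch of its match
theorem pv_go_nil (isB : Char → Bool) (cur : List Char) (acc : List (List Char)) :
    PySem.Chars.splitlines.go isB [] cur acc =
      if cur.isEmpty then acc.reverse else (cur.reverse :: acc).reverse := by
  rw [PySem.Chars.splitlines.go.eq_def]

theorem pv_go_crlf (isB : Char → Bool) (rest cur : List Char) (acc : List (List Char)) :
    PySem.Chars.splitlines.go isB ('\r' :: '\n' :: rest) cur acc =
      PySem.Chars.splitlines.go isB rest [] (cur.reverse :: acc) := by
  rw [PySem.Chars.splitlines.go.eq_def]
  rfl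

theorem pv_go_cons (isB : Char → Bool) (c : Char) (rest cur : List Char) (acc : List (List Char))
    (h : ¬(c = '\r' ∧ ∃ r, rest = '\n' :: r)) :
    PySem.Chars.splitlines.go isB (c :: rest) cur acc =
      if isB c then PySem.Chars.splitlines.go isB rest [] (cur.reverse :: acc)
      else PySem.Chars.splitlines.go isB rest (c :: cur) acc := by
  rw [PySem.Chars.splitlines.go.eq_def]
  split
  · rename_i heq; cases heq
  · rename_i r heq
    injection heq with h1 h2
    exact absurd ⟨h1, r, h2⟩ h
  · rename_i heq
    injection heq with h1 h2
    subst h1; subst h2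
    rfl

-- the accumulator of splitlines.go is a (reversed) prefix of its result
theorem pv_go_acc (isB : Char → Bool) :
    ∀ (n : Nat) (s : List Char), s.length ≤ n → ∀ (cur : List Char) (acc : List (List Char)),
      PySem.Chars.splitlines.go isB s cur acc = acc.reverse ++ PySem.Chars.splitlines.go isB s cur [] := by
  intro n
  induction n with
  | zero =>
    intro s hs cur acc
    have : s = [] := List.length_eq_zero_iff.mp (Nat.le_zero.mp hs)
    subst this
    rw [pv_go_nil, pv_go_nil]
    by_cases h : cur.isEmpty <;> simp [h]
  | succ n ih =>
    intro s hs cur acc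
    rcases s with _ | ⟨c, s'⟩
    · rw [pv_go_nil, pv_go_nil]
      by_cases h : cur.isEmpty <;> simp [h]
    · by_cases hsp : c = '\r' ∧ ∃ r, s' = '\n' :: r
      · obtain ⟨hc, r, hr⟩ := hsp
        subst hc; subst hr
        rw [pv_go_crlf, pv_go_crlf]
        rw [ih r (by simp at hs; omega) [] (cur.reverse :: acc),
            ih r (by simp at hs; omega) [] [cur.reverse]]
        simp
      · rw [pv_go_cons isB c s' cur acc hsp, pv_go_cons isB c s' cur [] hsp]
        by_cases hb : isB c <;> simp only [hb, if_true, if_false, Bool.false_eq_true]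
        · rw [ih s' (by simp at hs; omega) [] (cur.reverse :: acc),
              ih s' (by simp at hs; omega) [] [cur.reverse]]
          simp
        · exact ih s' (by simp at hs; omega) (c :: cur) acc

-- equation lemmas for pvScan, one per branch of its match
theorem pvScan_nil (word pending : List Char) (result : List String) :
    pvScan [] word pending result = if word ≠ [] then result ++ [String.ofList word] else result := by
  rw [pvScan.eq_def]

theorem pvScan_crlf (rest word pending : List Char) (result : List String) :
    pvScan ('\r' :: '\n' :: rest) word pending result =
      pvScan rest [] [] (if word ≠ [] then result ++ [String.ofList word] else result) := by
  rw [pvScan.eq_def]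
  rfl

theorem pvScan_cons (c : Char) (rest word pending : List Char) (result : List String)
    (h : ¬(c = '\r' ∧ ∃ r, rest = '\n' :: r)) :
    pvScan (c :: rest) word pending result =
      if pvIsBreak c then
        pvScan rest [] [] (if word ≠ [] then result ++ [String.ofList word] else result)
      else if PySem.Chars.isspace c then
        pvScan rest word (if word ≠ [] then pending ++ [c] else pending) result
      else
        pvScan rest (word ++ pending ++ [c]) [] result := by
  rw [pvScan.eq_def]
  split
  · rename_i heq; cases heq
  · rename_i r heq
    injection heq with h1 h2
    exact absurd ⟨h1, r, h2⟩ h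
  · rename_i heq
    injection heq with h1 h2
    subst h1; subst h2
    rfl

-- the trailing whitespace of the left-stripped current line (Source B's `pending`)
def pvTrail (u : List Char) : List Char :=
  ((PySem.Chars.lstrip u).reverse.takeWhile PySem.Chars.isspace).reverse

theorem pv_rstrip_eq_nil_iff (x : List Char) :
    PySem.Chars.rstrip x = [] ↔ ∀ a ∈ x, PySem.Chars.isspace a := by
  simp [PySem.Chars.rstrip, List.dropWhile_eq_nil_iff]

theorem pv_strip_eq_nil_iff (u : List Char) :
    PySem.Chars.strip u = [] ↔ PySem.Chars.lstrip u = [] := by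
  constructor
  · intro h
    rcases he : PySem.Chars.lstrip u with _ | ⟨a, as⟩
    · rfl
    · exfalso
      have ha : PySem.Chars.isspace a = false := by
        have := List.head?_dropWhile_not PySem.Chars.isspace u
        rw [show List.dropWhile PySem.Chars.isspace u = PySem.Chars.lstrip u from rfl, he] at this
        simpa using this
      have := (pv_rstrip_eq_nil_iff (PySem.Chars.lstrip u)).mp (by rw [← PySem.Chars.strip]; exact h)
      rw [he] at this
      have := this a (by simp)
      simp [ha] at this
  · intro h
    simp [PySem.Chars.strip, h, PySem.Chars.rstrip]

theorem pv_lstrip_append_of_ne_nil (u v : List Char) (h : PySem.Chars.lstrip u ≠ []) :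
    PySem.Chars.lstrip (u ++ v) = PySem.Chars.lstrip u ++ v := by
  simp only [PySem.Chars.lstrip, List.dropWhile_append]
  rw [if_neg (by simp only [List.isEmpty_iff]; exact h)]

theorem pv_lstrip_append_of_nil (u v : List Char) (h : PySem.Chars.lstrip u = []) :
    PySem.Chars.lstrip (u ++ v) = PySem.Chars.lstrip v := by
  simp only [PySem.Chars.lstrip, List.dropWhile_append]
  rw [if_pos (by simp only [List.isEmpty_iff]; exact h)]

theorem pv_rstrip_append_ws (x : List Char) (c : Char) (hc : PySem.Chars.isspace c = true) :
    PySem.Chars.rstrip (x ++ [c]) = PySem.Chars.rstrip x := by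
  simp [PySem.Chars.rstrip, hc]

-- whitespace appended to a line with content: strip unchanged, trail grows
theorem pv_strip_append_ws (u : List Char) (c : Char) (hc : PySem.Chars.isspace c = true)
    (hw : PySem.Chars.strip u ≠ []) :
    PySem.Chars.strip (u ++ [c]) = PySem.Chars.strip u := by
  have hl : PySem.Chars.lstrip u ≠ [] := fun h => hw ((pv_strip_eq_nil_iff u).mpr h)
  show PySem.Chars.rstrip (PySem.Chars.lstrip (u ++ [c])) = _
  rw [pv_lstrip_append_of_ne_nil u [c] hl, pv_rstrip_append_ws _ c hc]
  rfl

theorem pv_trail_append_ws (u : List Char) (c : Char) (hc : PySem.Chars.isspace c = true)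
    (hw : PySem.Chars.strip u ≠ []) :
    pvTrail (u ++ [c]) = pvTrail u ++ [c] := by
  have hl : PySem.Chars.lstrip u ≠ [] := fun h => hw ((pv_strip_eq_nil_iff u).mpr h)
  unfold pvTrail
  rw [pv_lstrip_append_of_ne_nil u [c] hl]
  simp [hc]

-- whitespace appended to a line without content: everything stays empty
theorem pv_strip_append_ws_nil (u : List Char) (c : Char) (hc : PySem.Chars.isspace c = true)
    (hw : PySem.Chars.strip u = []) :
    PySem.Chars.strip (u ++ [c]) = [] ∧ pvTrail (u ++ [c]) = [] := by
  have hl : PySem.Chars.lstrip u = [] := (pv_strip_eq_nil_iff u).mp hw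
  have h2 : PySem.Chars.lstrip (u ++ [c]) = [] := by
    rw [pv_lstrip_append_of_nil u [c] hl]
    simp [PySem.Chars.lstrip, hc]
  constructor
  · exact (pv_strip_eq_nil_iff _).mpr h2
  · simp [pvTrail, h2]

theorem pv_trail_of_strip_nil (u : List Char) (hw : PySem.Chars.strip u = []) :
    pvTrail u = [] := by
  have hl : PySem.Chars.lstrip u = [] := (pv_strip_eq_nil_iff u).mp hw
  simp [pvTrail, hl]

theorem pv_strip_trail (u : List Char) :
    PySem.Chars.strip u ++ pvTrail u = PySem.Chars.lstrip u := by
  show PySem.Chars.rstrip (PySem.Chars.lstrip u) ++ _ = _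
  unfold PySem.Chars.rstrip pvTrail
  rw [← List.reverse_append, List.takeWhile_append_dropWhile, List.reverse_reverse]

-- a non-whitespace char appended: strip takes word, pending and the char; trail empties
theorem pv_strip_append_nonws (u : List Char) (c : Char) (hc : PySem.Chars.isspace c = false) :
    PySem.Chars.strip (u ++ [c]) = PySem.Chars.strip u ++ pvTrail u ++ [c] ∧ pvTrail (u ++ [c]) = [] := by
  have hl : PySem.Chars.lstrip (u ++ [c]) = PySem.Chars.lstrip u ++ [c] := by
    by_cases h : PySem.Chars.lstrip u = []
    · rw [pv_lstrip_append_of_nil u [c] h, h]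
      simp [PySem.Chars.lstrip, hc]
    · exact pv_lstrip_append_of_ne_nil u [c] h
  constructor
  · show PySem.Chars.rstrip (PySem.Chars.lstrip (u ++ [c])) = _
    rw [hl, pv_strip_trail u]
    simp [PySem.Chars.rstrip, hc]
  · unfold pvTrail
    rw [hl]
    simp [hc]

-- MAIN INVARIANT: pvScan with word = strip of the current-line prefix u and pending = its trail
-- computes exactly the cleaned lines that splitlines.go (with cur = u.reverse) would produce
-- the cleaned contribution of one line
def pvF (u : List Char) : List (List Char) :=
  if PySem.Chars.strip u ≠ [] then [PySem.Chars.strip u] else []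

theorem pvCleanGo_nil : pvCleanGo [] = [] := rfl

theorem pvCleanGo_cons (u : List Char) (X : List (List Char)) :
    pvCleanGo (u :: X) = pvF u ++ pvCleanGo X := by
  by_cases h : PySem.Chars.strip u = [] <;> simp [pvCleanGo, pvF, h]

theorem pv_strip_nil : PySem.Chars.strip [] = [] := rfl

theorem pv_trail_nil : pvTrail [] = [] := rfl

-- flushing the current word is exactly cleaning the one-line list [u]
theorem pv_flush (u : List Char) (result : List String) :
    (if PySem.Chars.strip u ≠ [] then result ++ [String.ofList (PySem.Chars.strip u)] else result)
      = result ++ (pvF u).map String.ofList := by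
  by_cases hw : PySem.Chars.strip u = [] <;> simp [pvF, hw]

theorem pv_main_nil (u : List Char) (result : List String) :
    pvScan [] (PySem.Chars.strip u) (pvTrail u) result =
      result ++ (pvCleanGo (PySem.Chars.splitlines.go pvIsB [] u.reverse [])).map String.ofList := by
  rw [pvScan_nil, pv_go_nil, pv_flush]
  rcases u with _ | ⟨a, t⟩
  · simp [pvF, pv_strip_nil, pvCleanGo_nil]
  · simp [pvCleanGo_cons, pvCleanGo_nil]

theorem pv_main (n : Nat) : ∀ (cs : List Char), cs.length ≤ n → ∀ (u : List Char) (result : List String),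
    pvScan cs (PySem.Chars.strip u) (pvTrail u) result =
      result ++ (pvCleanGo (PySem.Chars.splitlines.go pvIsB cs u.reverse [])).map String.ofList := by
  induction n with
  | zero =>
    intro cs hcs u result
    have : cs = [] := List.length_eq_zero_iff.mp (Nat.le_zero.mp hcs)
    subst this
    exact pv_main_nil u result
  | succ n ih =>
    intro cs hcs u result
    rcases cs with _ | ⟨c, cs'⟩
    · exact pv_main_nil u result
    · by_cases hsp : c = '\r' ∧ ∃ r, cs' = '\n' :: r
      · obtain ⟨hc, r, hr⟩ := hsp
        subst hc; subst hr
        rw [pvScan_crlf, pv_go_crlf, pv_flush]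
        have h1 := ih r (by simp at hcs; omega) [] (result ++ (pvF u).map String.ofList)
        rw [pv_strip_nil, pv_trail_nil] at h1
        rw [h1, pv_go_acc pvIsB r.length r le_rfl [] [u.reverse.reverse]]
        simp [pvCleanGo_cons]
      · rw [pvScan_cons c cs' _ _ result hsp, pv_go_cons pvIsB c cs' u.reverse [] hsp, pvBreak_eq]
        by_cases hb : pvIsB c = true
        · simp only [hb, if_true]
          rw [pv_flush]
          have h1 := ih cs' (by simp at hcs; omega) [] (result ++ (pvF u).map String.ofList)
          rw [pv_strip_nil, pv_trail_nil] at h1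
          rw [h1, pv_go_acc pvIsB cs'.length cs' le_rfl [] [u.reverse.reverse]]
          simp [pvCleanGo_cons]
        · simp only [hb, if_false, Bool.false_eq_true]
          by_cases hws : PySem.Chars.isspace c = true
          · simp only [hws, if_true]
            have h1 := ih cs' (by simp at hcs; omega) (u ++ [c]) result
            rw [show (u ++ [c]).reverse = c :: u.reverse by simp] at h1
            by_cases hw : PySem.Chars.strip u = []
            · obtain ⟨hs2, ht2⟩ := pv_strip_append_ws_nil u c hws hw
              rw [hs2, ht2] at h1
              rw [hw, pv_trail_of_strip_nil u hw]
              simpa using h1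
            · rw [pv_strip_append_ws u c hws hw, pv_trail_append_ws u c hws hw] at h1
              rw [if_pos hw]
              exact h1
          · simp only [hws, if_false, Bool.false_eq_true]
            have h1 := ih cs' (by simp at hcs; omega) (u ++ [c]) result
            rw [show (u ++ [c]).reverse = c :: u.reverse by simp] at h1
            obtain ⟨hs2, ht2⟩ := pv_strip_append_nonws u c (by simpa using hws)
            rw [hs2, ht2] at h1
            simpa using h1

theorem pvScan_clean (s : String) (result : List String) :
    pvScan s.toList [] [] result = result ++ (pvCleanC s.toList).map String.ofList := by
  have := pv_main s.toList.length s.toList le_rfl [] result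
  simpa [pvCleanC, pv_splitlines_go] using this

theorem pv_strip_ofList (cs : List Char) :
    PySem.Str.strip (String.ofList cs) = String.ofList (PySem.Chars.strip cs) := by
  apply String.toList_inj.mp
  simp [PySem.Str.toList_strip]

theorem pvCleanS_eq (s : String) :
    pvCleanS s = (pvCleanC s.toList).map String.ofList := by
  show (((PySem.Chars.splitlines s.toList).map String.ofList).map (fun line => PySem.Str.strip line)).filter
      (fun t => t ≠ "") = _
  rw [List.map_map]
  have h1 : (fun line => PySem.Str.strip line) ∘ String.ofList =
      String.ofList ∘ PySem.Chars.strip := by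
    funext cs; exact pv_strip_ofList cs
  rw [h1, ← List.map_map, List.filter_map]
  unfold pvCleanC pvCleanGo
  congr 1
  apply List.filter_congr
  intro t _
  simp [Function.comp]

-- A's inner loop appends the stripped non-empty lines of one sentence
theorem pv_inner : ∀ (lines : List String) (init : List String),
    lines.foldl
      (fun result part =>
        let s := PySem.Str.strip part
        if s ≠ "" then result ++ [s] else result)
      init =
      init ++ ((lines.map (fun l => PySem.Str.strip l)).filter (fun t => t ≠ "")) := by
  intro lines
  induction lines with
  | nil => intro init; simp
  | cons l ls ih =>
    intro init
    show ls.foldl _ (if PySem.Str.strip l ≠ "" then init ++ [PySem.Str.strip l] else init) = _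
    rw [ih]
    by_cases h : PySem.Str.strip l ≠ "" <;> simp [h]

-- A's nested loops compute the flatMap of the per-sentence cleaned lines
theorem pv_A_flat : ∀ (l : List String) (init : List String),
    l.foldl
      (fun result sentence =>
        (PySem.Str.splitlines sentence).foldl
          (fun result part =>
            let s := PySem.Str.strip part
            if s ≠ "" then result ++ [s] else result)
          result)
      init = init ++ l.flatMap pvCleanS := by
  intro l
  induction l with
  | nil => intro init; simp
  | cons s ls ih =>
    intro init
    show ls.foldl _ ((PySem.Str.splitlines s).foldl _ init) = _
    rw [ih, pv_inner]
    simp [pvCleanS]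

-- B's outer loop computes the same flatMap
theorem pv_B_flat : ∀ (l : List String) (init : List String),
    l.foldl (fun result sentence => pvScan sentence.toList [] [] result) init =
      init ++ l.flatMap (fun s => (pvCleanC s.toList).map String.ofList) := by
  intro l
  induction l with
  | nil => intro init; simp
  | cons s ls ih =>
    intro init
    show ls.foldl _ (pvScan s.toList [] [] init) = _
    rw [pvScan_clean, ih]
    simp

theorem pv_final (sentences : List String) :
    sanitize_sentences sentences = sanitize_sentences_alt sentences := by
  show _ = sentences.foldl _ []
  rw [sanitize_sentences, pv_A_flat sentences [], pv_B_flat sentences [], List.nil_append,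
    List.nil_append]
  congr 1
  funext s
  rw [pvCleanS_eq]

-- ===== VERDICT (by name: the statement is the Claim_ definition above) =====
theorem sanitize_sentences_spec : Claim_equal_sanitize_sentences := by
  intro sentences _
  exact pv_final sentences
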